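-- pv_equiv track=rewrite | github.com/Rs2003SuhaniBansal/MachineLearning | lab8/q3.py | ordinal_fit
-- ===== SOURCE A (Python) =====
-- def ordinal_fit(data):
--     """Create mapping dictionary for ordinal encoding."""
--     mapping = {}
--     index = 0
--     for value in data:
--         if value not in mapping:
--             mapping[value] = index
--             index += 1
--     return mapping
-- ===== SOURCE B (Python) =====
-- def ordinal_fit(data):
--     """Create mapping dictionary for ordinal encoding."""
--     first = {}
--     for i, v in reversed(list(enumerate(data))):
--         first[v] = i
--     return {v: r for r, (v, _) in enumerate(sorted(first.items(), key=lambda kv: kv[1]))}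
-- ===== Notes on version B (the rewrite author's own statement) =====
-- stated objective: alternative
-- what changed: B keeps no membership-checked counter loop: a reverse scan records each value's first occurrence index by plain overwriting (last write wins), then the distinct values are sorted by that index and ranked by enumeration.
import Mathlib
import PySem

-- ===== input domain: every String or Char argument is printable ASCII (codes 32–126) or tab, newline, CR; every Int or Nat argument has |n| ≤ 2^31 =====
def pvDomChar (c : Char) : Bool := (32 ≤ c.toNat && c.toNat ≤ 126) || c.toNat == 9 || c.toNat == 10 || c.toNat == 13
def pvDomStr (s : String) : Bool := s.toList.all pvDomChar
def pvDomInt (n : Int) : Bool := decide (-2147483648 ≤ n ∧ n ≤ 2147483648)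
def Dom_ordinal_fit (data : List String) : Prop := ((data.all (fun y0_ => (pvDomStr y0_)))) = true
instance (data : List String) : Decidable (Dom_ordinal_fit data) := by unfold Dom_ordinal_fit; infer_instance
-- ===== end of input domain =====

-- B replaces A's first-seen dict+counter loop by a sort-based ranking: a reverse scan records each
-- value's first index (last write wins), then the values are sorted by that index and ranked (alternative).

-- ===== PORT A =====
-- A: single loop, dict + running index; insert when the value is not yet a key.
def ordinal_fit (data : List String) : List (String × Int) :=
  (data.foldl
    (fun (st : PySem.Dict String Int × Int) value =>
      if st.1.contains value then st else (st.1.insert value st.2, st.2 + 1))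
    (PySem.Dict.empty, 0)).1.items

-- ===== PORT B =====
-- B: for i, v in reversed(list(enumerate(data))): first[v] = i   (last write = first occurrence);
--    then {v: r for r, (v, _) in enumerate(sorted(first.items(), key=lambda kv: kv[1]))}
--    (keys of `first` are distinct, so the comprehension's items are this mapped list).
def ordinal_fit_alt (data : List String) : List (String × Int) :=
  (PySem.List.enumerate
      (PySem.List.sorted
        (((PySem.List.enumerate data 0).reverse).foldl
            (fun (d : PySem.Dict String Int) p => d.insert p.2 p.1) PySem.Dict.empty).items
        (fun kv => kv.2))
      0).map
    (fun p => (p.2.1, p.1))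

-- ===== PRECONDITION & SPEC =====
def Spec_ordinal_fit (data : List String) (out : List (String × Int)) : Prop := out = ordinal_fit_alt data
instance (data : List String) (out : List (String × Int)) : Decidable (Spec_ordinal_fit data out) := by unfold Spec_ordinal_fit; infer_instance

-- ===== CLAIM (what is proved, stated in full; the proofs are below) =====
def Claim_equal_ordinal_fit : Prop := ∀ (data : List String), Dom_ordinal_fit data → Spec_ordinal_fit data (ordinal_fit data)

-- ===== LEMMAS AND PROOFS =====

-- The new first-seen-unique values of `vs`, given the keys already seen.
def pvNewU : List String → List String → List String
  | [], _ => []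
  | v :: vs, seen => if v ∈ seen then pvNewU vs seen else v :: pvNewU vs (seen ++ [v])

-- B's reverse-scan dict, built structurally from the front (the foldr view of the reversed foldl).
def pvFD : List String → Int → PySem.Dict String Int
  | [], _ => PySem.Dict.empty
  | v :: vs, s => (pvFD vs (s + 1)).insert v s

-- ---- A side: the loop's items are the enumerated first-seen uniques ----

theorem pvFold_items : ∀ (vs : List String) (d : PySem.Dict String Int) (i : Int),
    (vs.foldl
      (fun (st : PySem.Dict String Int × Int) value =>
        if st.1.contains value then st else (st.1.insert value st.2, st.2 + 1))
      (d, i)).1.items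
    = d.items ++ (PySem.List.enumerate (pvNewU vs d.keys) i).map (fun p => (p.2, p.1)) := by
  intro vs
  induction vs with
  | nil => intro d i; simp [pvNewU]
  | cons v vs ih =>
    intro d i
    by_cases hm : v ∈ d.keys
    · have h : d.contains v = true := by
        simp [PySem.Dict.contains_eq_decide_mem_keys, hm]
      simp [pvNewU, hm, List.foldl_cons, h, ih]
    · have h' : d.contains v = false := by
        simp [PySem.Dict.contains_eq_decide_mem_keys, hm]
      rw [List.foldl_cons]
      simp only [h', Bool.false_eq_true, if_false]
      rw [ih (d.insert v i) (i + 1)]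
      rw [PySem.Dict.items_insert_of_not_contains _ _ h', PySem.Dict.keys_insert_of_not_contains _ _ h']
      simp [pvNewU, hm, PySem.List.enumerate_cons]

-- ---- pvNewU: membership, nodup ----

theorem pvMem_newU : ∀ (vs seen : List String) (c : String),
    c ∈ pvNewU vs seen ↔ c ∈ vs ∧ c ∉ seen := by
  intro vs
  induction vs with
  | nil => intro seen c; simp [pvNewU]
  | cons v vs ih =>
    intro seen c
    by_cases h : v ∈ seen
    · simp only [pvNewU, h, if_true, ih]
      constructor
      · rintro ⟨hc, hs⟩; exact ⟨List.mem_cons_of_mem _ hc, hs⟩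
      · rintro ⟨hc, hs⟩
        rcases List.mem_cons.mp hc with rfl | hc
        · exact absurd h hs
        · exact ⟨hc, hs⟩
    · simp only [pvNewU, h, if_false, List.mem_cons, ih, List.mem_append]
      constructor
      · rintro (rfl | ⟨hc, hs⟩)
        · exact ⟨Or.inl rfl, h⟩
        · exact ⟨Or.inr hc, fun hx => hs (Or.inl hx)⟩
      · rintro ⟨rfl | hc, hs⟩
        · exact Or.inl rfl
        · by_cases hv : c = v
          · exact Or.inl hv
          · exact Or.inr ⟨hc, by tauto⟩

theorem pvNodup_newU : ∀ (vs seen : List String), (pvNewU vs seen).Nodup := by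
  intro vs
  induction vs with
  | nil => intro seen; simp [pvNewU]
  | cons v vs ih =>
    intro seen
    by_cases h : v ∈ seen
    · simpa [pvNewU, h] using ih seen
    · simp only [pvNewU, h, if_false, List.nodup_cons]
      refine ⟨fun hv => ?_, ih (seen ++ [v])⟩
      have := (pvMem_newU vs (seen ++ [v]) v).mp hv
      simp at this

-- ---- pvNewU lists first occurrences in strictly increasing index order ----

theorem pvPairwise_newU : ∀ (suf pre seen data : List String), data = pre ++ suf →
    (∀ x ∈ pre, x ∈ seen) →
    (pvNewU suf seen).Pairwise (fun a b => data.idxOf a < data.idxOf b) := by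
  intro suf
  induction suf with
  | nil => intro pre seen data _ _; simp [pvNewU]
  | cons v vs ih =>
    intro pre seen data hd hsub
    by_cases h : v ∈ seen
    · simp only [pvNewU, h, if_true]
      exact ih (pre ++ [v]) seen data (by simp [hd]) (by
        intro x hx
        rcases List.mem_append.mp hx with hx | hx
        · exact hsub x hx
        · simp at hx; subst hx; exact h)
    · simp only [pvNewU, h, if_false]
      have hvpre : v ∉ pre := fun hv => h (hsub v hv)
      have hidv : data.idxOf v = pre.length := by
        rw [hd, List.idxOf_append, if_neg hvpre, List.idxOf_cons_self]
        simp
      refine List.Pairwise.cons ?_ (ih (pre ++ [v]) (seen ++ [v]) data (by simp [hd]) (by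
        intro x hx
        rcases List.mem_append.mp hx with hx | hx
        · exact List.mem_append.mpr (Or.inl (hsub x hx))
        · exact List.mem_append.mpr (Or.inr hx)))
      intro b hb
      have hbm := (pvMem_newU vs (seen ++ [v]) b).mp hb
      have hbseen : b ∉ seen := fun hx => hbm.2 (List.mem_append.mpr (Or.inl hx))
      have hbv : b ≠ v := fun hx => hbm.2 (by simp [hx])
      have hbpre : b ∉ pre := fun hx => hbseen (hsub b hx)
      have hidb : data.idxOf b = (vs.idxOf b).succ + pre.length := by
        rw [hd, List.idxOf_append, if_neg hbpre, List.idxOf_cons_ne _ (Ne.symm hbv)]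
      rw [hidv, hidb]
      omega

-- ---- the reverse-scan dict: structure, lookups, keys ----

theorem pvRevFold_eq_fd : ∀ (vs : List String) (s : Int),
    ((PySem.List.enumerate vs s).reverse).foldl
        (fun (d : PySem.Dict String Int) p => d.insert p.2 p.1) PySem.Dict.empty
      = pvFD vs s := by
  intro vs
  induction vs with
  | nil => intro s; simp [PySem.List.enumerate, pvFD]
  | cons v vs ih =>
    intro s
    simp only [List.foldl_reverse] at ih ⊢
    rw [PySem.List.enumerate_cons, List.foldr_cons, ih]
    rfl

theorem pvFD_get? : ∀ (vs : List String) (s : Int) (c : String),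
    (pvFD vs s).get? c = if c ∈ vs then some (s + (vs.idxOf c : Int)) else none := by
  intro vs
  induction vs with
  | nil => intro s c; simp [pvFD, PySem.Dict.get?_empty]
  | cons v vs ih =>
    intro s c
    by_cases hc : c = v
    · subst hc
      simp [pvFD, PySem.Dict.get?_insert_self, List.idxOf_cons_self]
    · rw [pvFD, PySem.Dict.get?_insert_of_ne _ _ hc, ih]
      by_cases hm : c ∈ vs
      · have : c ∈ v :: vs := List.mem_cons_of_mem _ hm
        rw [if_pos hm, if_pos this, List.idxOf_cons_ne _ (Ne.symm hc)]
        congr 1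
        push_cast
        ring
      · have : c ∉ v :: vs := by simp [hc, hm]
        rw [if_neg hm, if_neg this]

theorem pvFD_nodup_keys : ∀ (vs : List String) (s : Int), (pvFD vs s).keys.Nodup := by
  intro vs
  induction vs with
  | nil => intro s; exact PySem.Dict.nodup_keys_empty
  | cons v vs ih => intro s; exact PySem.Dict.nodup_keys_insert _ _ _ (ih (s + 1))

theorem pvFD_mem_keys : ∀ (vs : List String) (s : Int) (c : String),
    c ∈ (pvFD vs s).keys ↔ c ∈ vs := by
  intro vs s c
  have h := PySem.Dict.get?_eq_none_iff_not_mem_keys (pvFD vs s) c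
  rw [pvFD_get?] at h
  by_cases hc : c ∈ vs <;> simp [hc] at h <;> tauto

-- items of the reverse-scan dict: its keys, each paired with its first index in `data`.
theorem pvFD_items (data : List String) :
    (pvFD data 0).items
      = (pvFD data 0).keys.map (fun k => (k, (data.idxOf k : Int))) := by
  rw [PySem.Dict.items_eq_map_keys _ (pvFD_nodup_keys data 0) 0]
  refine List.map_congr_left ?_
  intro k hk
  have hkd : k ∈ data := (pvFD_mem_keys data 0 k).mp hk
  have : (pvFD data 0).getD k 0 = ((pvFD data 0).get? k).getD 0 := rfl
  rw [this, pvFD_get?, if_pos hkd]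
  simp

-- the keys are a permutation of the first-seen uniques, so sorting by first index names them in order.
theorem pvSorted_items (data : List String) :
    PySem.List.sorted (pvFD data 0).items (fun kv => kv.2)
      = (pvNewU data []).map (fun k => (k, (data.idxOf k : Int))) := by
  rw [pvFD_items data]
  apply PySem.List.sorted_eq_of_perm_of_pairwise_lt
  · refine List.Perm.map _ ?_
    rw [List.perm_ext_iff_of_nodup (pvNodup_newU data []) (pvFD_nodup_keys data 0)]
    intro a
    rw [pvMem_newU, pvFD_mem_keys]
    simp
  · rw [List.pairwise_map]
    refine List.Pairwise.imp ?_ (pvPairwise_newU data [] [] data (by simp) (by simp))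
    intro a b h
    simpa using h

-- enumerating a key-paired list and keeping (key, rank) forgets the pairing.
theorem pvEnum_map_fst (f : String → Int) : ∀ (u : List String) (s : Int),
    (PySem.List.enumerate (u.map (fun v => (v, f v))) s).map (fun p => (p.2.1, p.1))
      = (PySem.List.enumerate u s).map (fun p => (p.2, p.1)) := by
  intro u
  induction u with
  | nil => intro s; simp [PySem.List.enumerate]
  | cons v vs ih => intro s; simp [PySem.List.enumerate_cons, ih]

-- ===== VERDICT (by name: the statement is the Claim_ definition above) =====
theorem ordinal_fit_spec : Claim_equal_ordinal_fit := by
  intro data _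
  show ordinal_fit data = ordinal_fit_alt data
  unfold ordinal_fit ordinal_fit_alt
  rw [pvFold_items data PySem.Dict.empty 0, pvRevFold_eq_fd data 0, pvSorted_items data,
    pvEnum_map_fst (fun k => (data.idxOf k : Int)) (pvNewU data []) 0]
  simp [PySem.Dict.empty, PySem.Dict.keys]
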